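-- pv_equiv track=rewrite | github.com/HowieHz/osu-beatmap-to-mania-converter | src/processor/metadata_converter/any_metadata_to_mania.py | any_metadata_to_mania
-- ===== SOURCE A (Python) =====
-- def any_metadata_to_mania(osu_file_metadata: list[str], keys: int) -> list[str]:
--     """将 osu 铺面的元数据转换成 osu!mania 的元数据\n
--     1. 设置 Mode 标识为 mania\n
--     2. 设置 CircleSize 为 keys 参数\n
--     3, 设置 BeatmapSetID 为 -1\n
--
--     Args:
--         osu_file_metadata (list[str]): 未被转换的元数据列，每行应有换行符（"\\n"）
--         keys (int): 铺面键数
--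
--     Returns:
--         list[str]: 转换后的元数据列，每行应有换行符（"\\n"）
--     """
--     # 设置键数为 keys
--     # 找到目标索引然后替换，整个文件 CircleSize 开头的按理来说只有这一处
--     for line in osu_file_metadata:
--         if line.startswith("CircleSize:"):
--             osu_file_metadata[osu_file_metadata.index(line)] = f"CircleSize:{keys}\n"
--             break
--
--     # 设置 BeatmapSetID 为 -1
--     for line in osu_file_metadata:
--         if line.startswith("BeatmapSetID:"):
--             osu_file_metadata[osu_file_metadata.index(line)] = "BeatmapSetID:-1\n"
--             break
--
--     # 设置 Mode 标识为 mania
--     # 找到目标索引然后替换，整个文件 Mode 开头的按理来说只有这一处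
--     for line in osu_file_metadata:
--         if line.startswith("Mode:"):
--             osu_file_metadata[osu_file_metadata.index(line)] = "Mode: 3\n"
--             break
--     return osu_file_metadata
-- ===== SOURCE B (Python) =====
-- def any_metadata_to_mania(osu_file_metadata: list[str], keys: int) -> list[str]:
--     """Single enumerate pass with per-field done flags (mutates in place)."""
--     cs_done = sid_done = mode_done = False
--     for i, line in enumerate(osu_file_metadata):
--         if not cs_done and line.startswith("CircleSize:"):
--             osu_file_metadata[i] = f"CircleSize:{keys}\n"
--             cs_done = True
--         elif not sid_done and line.startswith("BeatmapSetID:"):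
--             osu_file_metadata[i] = "BeatmapSetID:-1\n"
--             sid_done = True
--         elif not mode_done and line.startswith("Mode:"):
--             osu_file_metadata[i] = "Mode: 3\n"
--             mode_done = True
--     return osu_file_metadata
-- ===== Notes on version B (the rewrite author's own statement) =====
-- stated objective: idiomatic
-- what changed: Replaces A's three sequential scans (each re-searching the list with list.index to find the position) by one enumerate pass with three done-flags that writes at the current index directly.
import Mathlib
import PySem

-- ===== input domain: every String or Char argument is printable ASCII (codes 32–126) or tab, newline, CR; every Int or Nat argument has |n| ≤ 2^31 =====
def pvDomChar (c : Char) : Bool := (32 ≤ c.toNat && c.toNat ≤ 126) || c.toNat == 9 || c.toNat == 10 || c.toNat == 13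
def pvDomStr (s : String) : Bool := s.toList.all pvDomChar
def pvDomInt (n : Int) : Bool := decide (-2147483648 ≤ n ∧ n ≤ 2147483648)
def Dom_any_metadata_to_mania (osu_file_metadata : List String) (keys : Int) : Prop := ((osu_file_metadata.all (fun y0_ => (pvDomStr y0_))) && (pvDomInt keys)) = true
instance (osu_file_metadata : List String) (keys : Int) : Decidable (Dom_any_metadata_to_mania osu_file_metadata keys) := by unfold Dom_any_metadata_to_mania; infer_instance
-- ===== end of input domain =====

-- B rewrites the three first-match replacements as one enumerate pass with done-flags (idiomatic, in place).
-- Both programs mutate the argument list in place and return the same object; the equivalence proved here is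
-- about the returned list value.

-- ===== PORT A =====
-- one Python 'for line in lst: if line.startswith(pref): lst[lst.index(line)] = repl; break' loop:
-- 'full' is the list being scanned/indexed, 'rest' the remaining iteration.
def pvPassA (full : List String) (rest : List String) (pref repl : String) : List String :=
  match rest with
  | [] => full
  | l :: ls =>
    if PySem.Str.startswith l pref then
      match PySem.List.index? full l with
      | some k => full.set k repl
      | none => full   -- unreachable: l is drawn from full
    else pvPassA full ls pref repl

def any_metadata_to_mania (osu_file_metadata : List String) (keys : Int) : List String :=
  let r1 := pvPassA osu_file_metadata osu_file_metadata "CircleSize:" ("CircleSize:" ++ PySem.Int.toStr keys ++ "\n")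
  let r2 := pvPassA r1 r1 "BeatmapSetID:" "BeatmapSetID:-1\n"
  pvPassA r2 r2 "Mode:" "Mode: 3\n"

-- ===== PORT B =====
-- the single enumerate loop of Source B: three done-flags, rebuilds the list positionally.
def pvLoopB (rest : List String) (cs_done sid_done mode_done : Bool) (keys : Int) : List String :=
  match rest with
  | [] => []
  | l :: ls =>
    if !cs_done && PySem.Str.startswith l "CircleSize:" then
      ("CircleSize:" ++ PySem.Int.toStr keys ++ "\n") :: pvLoopB ls true sid_done mode_done keys
    else if !sid_done && PySem.Str.startswith l "BeatmapSetID:" then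
      "BeatmapSetID:-1\n" :: pvLoopB ls cs_done true mode_done keys
    else if !mode_done && PySem.Str.startswith l "Mode:" then
      "Mode: 3\n" :: pvLoopB ls cs_done sid_done true keys
    else
      l :: pvLoopB ls cs_done sid_done mode_done keys

def any_metadata_to_mania_alt (osu_file_metadata : List String) (keys : Int) : List String :=
  pvLoopB osu_file_metadata false false false keys

-- ===== PRECONDITION & SPEC =====
def Spec_any_metadata_to_mania (osu_file_metadata : List String) (keys : Int) (out : List String) : Prop := out = any_metadata_to_mania_alt osu_file_metadata keys
instance (osu_file_metadata : List String) (keys : Int) (out : List String) : Decidable (Spec_any_metadata_to_mania osu_file_metadata keys out) := by unfold Spec_any_metadata_to_mania; infer_instance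

-- ===== CLAIM (what is proved, stated in full; the proofs are below) =====
def Claim_equal_any_metadata_to_mania : Prop := ∀ (osu_file_metadata : List String) (keys : Int), Dom_any_metadata_to_mania osu_file_metadata keys → Spec_any_metadata_to_mania osu_file_metadata keys (any_metadata_to_mania osu_file_metadata keys)

-- ===== LEMMAS AND PROOFS =====

-- proof-side spec: replace the first line starting with pref by repl
def pvRF (pref repl : String) : List String → List String
  | [] => []
  | l :: ls => if PySem.Str.startswith l pref then repl :: ls else l :: pvRF pref repl ls

theorem pvRF_no_match (pref repl : String) (xs : List String)
    (h : ∀ x ∈ xs, PySem.Str.startswith x pref = false) : pvRF pref repl xs = xs := by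
  induction xs with
  | nil => rfl
  | cons a t ih =>
    simp only [pvRF, h a (by simp)]
    simp [ih (fun x hx => h x (by simp [hx]))]

theorem pvRF_append_no_match (pref repl : String) (done rest : List String)
    (h : ∀ x ∈ done, PySem.Str.startswith x pref = false) :
    pvRF pref repl (done ++ rest) = done ++ pvRF pref repl rest := by
  induction done with
  | nil => rfl
  | cons a t ih =>
    simp only [List.cons_append, pvRF, h a (by simp)]
    simp [ih (fun x hx => h x (by simp [hx]))]

theorem pvSet_middle (done : List String) (l : String) (ls : List String) (r : String) :
    (done ++ l :: ls).set done.length r = done ++ r :: ls := by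
  induction done with
  | nil => rfl
  | cons a t ih => simp [ih]

theorem pvPassA_eq_rf (pref repl : String) (full done rest : List String)
    (hfull : full = done ++ rest)
    (h : ∀ x ∈ done, PySem.Str.startswith x pref = false) :
    pvPassA full rest pref repl = pvRF pref repl full := by
  induction rest generalizing done with
  | nil =>
    subst hfull
    simp [pvPassA, pvRF_no_match pref repl _ (by simpa using h)]
  | cons l ls ih =>
    by_cases hl : PySem.Str.startswith l pref = true
    · have hnotin : l ∉ done := fun hm => by
        have hf := h l hm
        rw [PySem.Str.startswith_eq] at hf
        simp [hf] at hl
      have hidx : PySem.List.index? full l = some done.length := by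
        rw [PySem.List.index?_eq_some_iff]
        exact ⟨done, ls, hfull, rfl, hnotin⟩
      subst hfull
      simp only [pvPassA, if_true, hidx, pvSet_middle,
        pvRF_append_no_match pref repl done (l :: ls) h, pvRF, hl]
    · subst hfull
      simp only [pvPassA, hl]
      have := ih (done ++ [l]) (by simp) (by
        intro x hx
        rcases List.mem_append.1 hx with h1 | h2
        · exact h x h1
        · simp at h2; subst h2; simpa using hl)
      simpa using this

-- first char of any string that starts with p equals p's first char
theorem pvSw_head (l p : String) (h : PySem.Str.startswith l p = true) :
    p.toList ≠ [] → l.toList.head? = p.toList.head? := by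
  intro hp
  rw [PySem.Str.startswith_eq, PySem.Chars.startswith_iff] at h
  obtain ⟨u, hu⟩ := h
  cases hq : p.toList with
  | nil => exact absurd hq hp
  | cons c t =>
    rw [hq] at hu
    rw [← hu]
    simp

-- two startswith-prefixes with different first characters exclude each other
theorem pvExcl (l p q : String) (h : PySem.Str.startswith l p = true)
    (hpq : p.toList.head? ≠ q.toList.head?) (hp : p.toList ≠ []) (hq : q.toList ≠ []) :
    PySem.Str.startswith l q = false := by
  by_contra hc
  rw [Bool.not_eq_false] at hc
  exact hpq ((pvSw_head l p h hp).symm.trans (pvSw_head l q hc hq))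

theorem pvR1_head (keys : Int) :
    ("CircleSize:" ++ PySem.Int.toStr keys ++ "\n").toList.head? = some 'C' := by
  simp

theorem pvR1_not_sw (keys : Int) (q : String) (hq : q.toList.head? ≠ some 'C')
    (hqe : q.toList ≠ []) :
    PySem.Str.startswith ("CircleSize:" ++ PySem.Int.toStr keys ++ "\n") q = false := by
  by_contra hc
  rw [Bool.not_eq_false] at hc
  have := pvSw_head _ q hc hqe
  rw [pvR1_head] at this
  exact hq this.symm

def pvRFIf (b : Bool) (pref repl : String) (xs : List String) : List String :=
  if b then xs else pvRF pref repl xs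

theorem pvRFIf_cons_no (b : Bool) (pref repl x : String) (xs : List String)
    (h : PySem.Str.startswith x pref = false) :
    pvRFIf b pref repl (x :: xs) = x :: pvRFIf b pref repl xs := by
  rw [PySem.Str.startswith_eq] at h
  cases b <;> simp [pvRFIf, pvRF, h]

theorem pvRFIf_cons_yes (pref repl x : String) (xs : List String)
    (h : PySem.Str.startswith x pref = true) :
    pvRFIf false pref repl (x :: xs) = repl :: xs := by
  rw [PySem.Str.startswith_eq] at h
  simp [pvRFIf, pvRF, h]

theorem pvRFIf_true (pref repl : String) (xs : List String) : pvRFIf true pref repl xs = xs := rfl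

theorem pvLoopB_eq (rest : List String) (c s m : Bool) (keys : Int) :
    pvLoopB rest c s m keys =
      pvRFIf m "Mode:" "Mode: 3\n"
        (pvRFIf s "BeatmapSetID:" "BeatmapSetID:-1\n"
          (pvRFIf c "CircleSize:" ("CircleSize:" ++ PySem.Int.toStr keys ++ "\n") rest)) := by
  induction rest generalizing c s m with
  | nil => cases c <;> cases s <;> cases m <;> rfl
  | cons l ls ih =>
    by_cases h1 : (!c && PySem.Str.startswith l "CircleSize:") = true
    · obtain ⟨hc, hsw1⟩ := Bool.and_eq_true_iff.1 h1
      have hc : c = false := by cases c <;> simp_all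
      have hsw2 : PySem.Str.startswith l "BeatmapSetID:" = false :=
        pvExcl l _ _ hsw1 (by decide) (by decide) (by decide)
      have hsw3 : PySem.Str.startswith l "Mode:" = false :=
        pvExcl l _ _ hsw1 (by decide) (by decide) (by decide)
      subst hc
      rw [pvRFIf_cons_yes _ _ _ _ hsw1,
        pvRFIf_cons_no s _ _ _ _ (pvR1_not_sw keys _ (by decide) (by decide)),
        pvRFIf_cons_no m _ _ _ _ (pvR1_not_sw keys _ (by decide) (by decide))]
      simp only [pvLoopB, h1, if_true]
      rw [ih true s m, pvRFIf_true]
    · by_cases h2 : (!s && PySem.Str.startswith l "BeatmapSetID:") = true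
      · obtain ⟨hs, hsw2⟩ := Bool.and_eq_true_iff.1 h2
        have hs : s = false := by cases s <;> simp_all
        have hsw1 : PySem.Str.startswith l "CircleSize:" = false :=
          pvExcl l _ _ hsw2 (by decide) (by decide) (by decide)
        have hsw3 : PySem.Str.startswith l "Mode:" = false :=
          pvExcl l _ _ hsw2 (by decide) (by decide) (by decide)
        subst hs
        rw [pvRFIf_cons_no c _ _ _ _ hsw1, pvRFIf_cons_yes _ _ _ _ hsw2,
          pvRFIf_cons_no m _ _ _ _ (by decide)]
        simp only [pvLoopB]
        rw [if_neg h1, if_pos h2, ih c true m, pvRFIf_true]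
      · by_cases h3 : (!m && PySem.Str.startswith l "Mode:") = true
        · obtain ⟨hm, hsw3⟩ := Bool.and_eq_true_iff.1 h3
          have hm : m = false := by cases m <;> simp_all
          have hsw1 : PySem.Str.startswith l "CircleSize:" = false :=
            pvExcl l _ _ hsw3 (by decide) (by decide) (by decide)
          have hsw2 : PySem.Str.startswith l "BeatmapSetID:" = false :=
            pvExcl l _ _ hsw3 (by decide) (by decide) (by decide)
          subst hm
          rw [pvRFIf_cons_no c _ _ _ _ hsw1, pvRFIf_cons_no s _ _ _ _ hsw2,
            pvRFIf_cons_yes _ _ _ _ hsw3]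
          simp only [pvLoopB]
          rw [if_neg h1, if_neg h2, if_pos h3, ih c s true, pvRFIf_true]
        · -- no branch fires: each field is either done or the line does not match it
          have step1 : pvRFIf c "CircleSize:" ("CircleSize:" ++ PySem.Int.toStr keys ++ "\n") (l :: ls)
              = l :: pvRFIf c "CircleSize:" ("CircleSize:" ++ PySem.Int.toStr keys ++ "\n") ls := by
            cases c
            · exact pvRFIf_cons_no _ _ _ _ _ (by simpa using h1)
            · rfl
          have step2 : ∀ xs, pvRFIf s "BeatmapSetID:" "BeatmapSetID:-1\n" (l :: xs)
              = l :: pvRFIf s "BeatmapSetID:" "BeatmapSetID:-1\n" xs := by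
            intro xs
            cases s
            · exact pvRFIf_cons_no _ _ _ _ _ (by simpa using h2)
            · rfl
          have step3 : ∀ xs, pvRFIf m "Mode:" "Mode: 3\n" (l :: xs)
              = l :: pvRFIf m "Mode:" "Mode: 3\n" xs := by
            intro xs
            cases m
            · exact pvRFIf_cons_no _ _ _ _ _ (by simpa using h3)
            · rfl
          rw [step1, step2, step3]
          simp only [pvLoopB]
          rw [if_neg h1, if_neg h2, if_neg h3, ih c s m]

-- ===== VERDICT (by name: the statement is the Claim_ definition above) =====
theorem any_metadata_to_mania_spec : Claim_equal_any_metadata_to_mania := by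
  intro lst keys _
  show any_metadata_to_mania lst keys = any_metadata_to_mania_alt lst keys
  show pvPassA
      (pvPassA (pvPassA lst lst "CircleSize:" ("CircleSize:" ++ PySem.Int.toStr keys ++ "\n"))
        (pvPassA lst lst "CircleSize:" ("CircleSize:" ++ PySem.Int.toStr keys ++ "\n"))
        "BeatmapSetID:" "BeatmapSetID:-1\n")
      (pvPassA (pvPassA lst lst "CircleSize:" ("CircleSize:" ++ PySem.Int.toStr keys ++ "\n"))
        (pvPassA lst lst "CircleSize:" ("CircleSize:" ++ PySem.Int.toStr keys ++ "\n"))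
        "BeatmapSetID:" "BeatmapSetID:-1\n")
      "Mode:" "Mode: 3\n"
    = pvLoopB lst false false false keys
  rw [pvPassA_eq_rf _ _ _ [] _ (List.nil_append _).symm (by simp),
      pvPassA_eq_rf _ _ _ [] _ (List.nil_append _).symm (by simp),
      pvPassA_eq_rf _ _ _ [] _ (List.nil_append _).symm (by simp),
      pvLoopB_eq]
  rfl
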